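-- pv_equiv track=rewrite | github.com/sonsusit20051/ConvertSP | backend/server.py | _detect_tld_from_host
-- ===== SOURCE A (Python) =====
-- from typing import Deque, Dict, Optional
--
-- SHOPEE_MARKET_DOMAIN_BY_TLD = {
--     "vn": "shopee.vn",
--     "th": "shopee.co.th",
--     "sg": "shopee.sg",
--     "my": "shopee.com.my",
--     "ph": "shopee.ph",
--     "id": "shopee.co.id",
--     "tw": "shopee.tw",
--     "br": "shopee.com.br",
--     "mx": "shopee.com.mx",
--     "co": "shopee.com.co",
--     "cl": "shopee.cl",
-- }
--
-- def _normalize_host(host: str) -> str: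
--     return (host or "").strip().lower().rstrip(".")
--
-- def _detect_tld_from_host(host: str) -> Optional[str]:
--     normalized = _normalize_host(host)
--     if not normalized:
--         return None
--
--     for tld, market_domain in SHOPEE_MARKET_DOMAIN_BY_TLD.items():
--         short_domain = f"s.{market_domain}"
--         if (
--             normalized == market_domain
--             or normalized.endswith(f".{market_domain}")
--             or normalized == short_domain
--             or normalized.endswith(f".{short_domain}")
--         ):
--             return tld
--
--     return None
-- ===== SOURCE B (Python) =====
-- from typing import Optional
--
-- SHOPEE_MARKET_DOMAIN_BY_TLD = {
--     "vn": "shopee.vn",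
--     "th": "shopee.co.th",
--     "sg": "shopee.sg",
--     "my": "shopee.com.my",
--     "ph": "shopee.ph",
--     "id": "shopee.co.id",
--     "tw": "shopee.tw",
--     "br": "shopee.com.br",
--     "mx": "shopee.com.mx",
--     "co": "shopee.com.co",
--     "cl": "shopee.cl",
-- }
--
-- _TLD_BY_DOMAIN = {}
-- for _tld, _md in SHOPEE_MARKET_DOMAIN_BY_TLD.items():
--     _TLD_BY_DOMAIN[_md] = _tld
--     _TLD_BY_DOMAIN["s." + _md] = _tld
--
--
-- def _normalize_host(host: str) -> str:
--     return (host or "").strip().lower().rstrip(".")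
--
--
-- def _detect_tld_from_host(host: str) -> Optional[str]:
--     suffix = _normalize_host(host)
--     if not suffix:
--         return None
--     while True:
--         tld = _TLD_BY_DOMAIN.get(suffix)
--         if tld is not None:
--             return tld
--         dot = suffix.find(".")
--         if dot == -1:
--             return None
--         suffix = suffix[dot + 1:]
-- ===== Notes on version B (the rewrite author's own statement) =====
-- stated objective: idiomatic
-- what changed: Replaces the per-entry endswith scan over the 11-market table with a lookup dict (bare and 's.'-prefixed domains) built once, queried along the host's label-boundary suffixes from longest to shortest.
import Mathlib
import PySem

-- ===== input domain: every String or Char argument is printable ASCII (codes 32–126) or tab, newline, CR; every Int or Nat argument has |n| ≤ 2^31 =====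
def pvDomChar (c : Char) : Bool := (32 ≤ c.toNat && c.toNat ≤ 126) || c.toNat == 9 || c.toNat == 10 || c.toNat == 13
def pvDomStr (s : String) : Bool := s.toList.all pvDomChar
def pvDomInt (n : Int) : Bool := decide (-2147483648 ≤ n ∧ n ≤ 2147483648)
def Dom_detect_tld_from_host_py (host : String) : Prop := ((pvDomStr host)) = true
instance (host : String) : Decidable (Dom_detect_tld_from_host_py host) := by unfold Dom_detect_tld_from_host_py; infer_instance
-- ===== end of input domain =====

-- B replaces A's per-entry endswith scan over the 11-market table with a lookup dict built once
-- (bare and "s."-prefixed domains) queried along the host's label-boundary suffixes (idiomatic).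

-- ===== PORT A =====
-- SHOPEE_MARKET_DOMAIN_BY_TLD, iterated in insertion order
def pvTable : List (String × String) :=
  [("vn", "shopee.vn"), ("th", "shopee.co.th"), ("sg", "shopee.sg"), ("my", "shopee.com.my"),
   ("ph", "shopee.ph"), ("id", "shopee.co.id"), ("tw", "shopee.tw"), ("br", "shopee.com.br"),
   ("mx", "shopee.com.mx"), ("co", "shopee.com.co"), ("cl", "shopee.cl")]

-- _normalize_host: (host or "").strip().lower().rstrip(".").
-- '.rstrip(".")' has no PySem primitive; ported by hand as reverse/dropWhile/reverse, exact:
-- it drops exactly the trailing '.' characters.  ('host or ""' is the identity on strings here.)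
def pvNormalize (host : String) : List Char :=
  ((PySem.Chars.lower (PySem.Chars.strip host.toList)).reverse.dropWhile (· == '.')).reverse

-- the four-way test of A's loop body, in A's order
def pvCondA (n m : List Char) : Bool :=
  n == m || PySem.Chars.endswith n ('.' :: m)
    || n == ('s' :: '.' :: m) || PySem.Chars.endswith n ('.' :: 's' :: '.' :: m)

-- the 'for tld, market_domain in ….items()' loop with its early return
def pvScanA : List (String × String) → List Char → Option String
  | [], _ => none
  | (tld, md) :: rest, n => if pvCondA n md.toList then some tld else pvScanA rest n

def detect_tld_from_host_py (host : String) : Option String :=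
  let normalized := pvNormalize host
  if normalized = [] then none else pvScanA pvTable normalized

-- ===== PORT B =====
-- _TLD_BY_DOMAIN: the module-level dict built once from the table
def pvIdx : PySem.Dict (List Char) String :=
  pvTable.foldl
    (fun d p => (PySem.Dict.insert d p.2.toList p.1).insert ('s' :: '.' :: p.2.toList) p.1)
    PySem.Dict.empty

-- the 'while True' suffix walk.  'dot = suffix.find(".")' / 'suffix[dot + 1:]' are ported as
-- dropWhile: dropWhile (· != '.') is the suffix from the first '.', it is empty iff find = -1,
-- and its tail is suffix[dot + 1:] (exact for the single-character needle ".").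
def pvWalk (cs : List Char) : Option String :=
  match pvIdx.get? cs with
  | some tld => some tld
  | none =>
    match h : cs.dropWhile (· != '.') with
    | [] => none
    | _ :: tail => pvWalk tail
termination_by cs.length
decreasing_by
  have hle := List.length_dropWhile_le (fun c => c != '.') cs
  rw [h] at hle
  simp at hle
  omega

def detect_tld_from_host_py_alt (host : String) : Option String :=
  let suffix := pvNormalize host
  if suffix = [] then none else pvWalk suffix

-- ===== PRECONDITION & SPEC =====
def Spec_detect_tld_from_host_py (host : String) (out : Option String) : Prop := out = detect_tld_from_host_py_alt host
instance (host : String) (out : Option String) : Decidable (Spec_detect_tld_from_host_py host out) := by unfold Spec_detect_tld_from_host_py; infer_instance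

-- ===== CLAIM (what is proved, stated in full; the proofs are below) =====
def Claim_equal_detect_tld_from_host_py : Prop := ∀ (host : String), Dom_detect_tld_from_host_py host → Spec_detect_tld_from_host_py host (detect_tld_from_host_py host)

-- ===== LEMMAS AND PROOFS =====

-- 'k is a label-boundary suffix of cs': cs itself, or preceded by a '.' inside cs
def pvBsuf (cs k : List Char) : Prop := cs = k ∨ ('.' :: k) <:+ cs

-- Bool form of pvBsuf, for the finite key-table checks by decide
def pvBsufB (cs k : List Char) : Bool := cs == k || ('.' :: k).isSuffixOf cs

lemma pvBsufB_iff (cs k : List Char) : pvBsufB cs k = true ↔ pvBsuf cs k := by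
  simp [pvBsufB, pvBsuf, List.isSuffixOf_iff_suffix]

-- unfolding equations for the suffix walk
lemma pvWalk_eq_hit {cs : List Char} {t : String} (hget : pvIdx.get? cs = some t) :
    pvWalk cs = some t := by rw [pvWalk, hget]

lemma pvWalk_eq_none {cs : List Char} (hget : pvIdx.get? cs = none)
    (hd : cs.dropWhile (· != '.') = []) : pvWalk cs = none := by
  rw [pvWalk, hget]
  split
  · next tld heq => cases heq
  · split
    · rfl
    · next c' tail' heq => rw [hd] at heq; cases heq

lemma pvWalk_eq_step {cs tail : List Char} {c : Char} (hget : pvIdx.get? cs = none)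
    (hd : cs.dropWhile (· != '.') = c :: tail) : pvWalk cs = pvWalk tail := by
  rw [pvWalk, hget]
  split
  · next tld heq => cases heq
  · split
    · next heq => rw [hd] at heq; cases heq
    · next c' tail' heq =>
        rw [hd] at heq
        injection heq with _ h2
        rw [h2]

-- finite facts about the concrete key table
lemma pvIdx_nodup_keys : pvIdx.keys.Nodup := by decide

-- any two keys where one is a boundary suffix of (or equal to) the other carry the same tld
lemma pvKey_uniq : ∀ p ∈ pvIdx.items, ∀ q ∈ pvIdx.items,
    (pvBsufB p.1 q.1 || p.1 == q.1) = true → p.2 = q.2 := by decide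

lemma pvTable_key1 : ∀ p ∈ pvTable, (p.2.toList, p.1) ∈ pvIdx.items := by decide
lemma pvTable_key2 : ∀ p ∈ pvTable, ('s' :: '.' :: p.2.toList, p.1) ∈ pvIdx.items := by decide
lemma pvItems_src : ∀ q ∈ pvIdx.items, ∃ p ∈ pvTable,
    q.2 = p.1 ∧ (q.1 = p.2.toList ∨ q.1 = 's' :: '.' :: p.2.toList) := by decide

lemma pvCondA_iff (cs m : List Char) :
    pvCondA cs m = true ↔ pvBsuf cs m ∨ pvBsuf cs ('s' :: '.' :: m) := by
  simp [pvCondA, pvBsuf, PySem.Chars.endswith_iff]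
  tauto

-- two boundary suffixes of the same string are boundary-suffix related (or equal)
lemma pvBsuf_antichain (cs k1 k2 : List Char) (h1 : pvBsuf cs k1) (h2 : pvBsuf cs k2) :
    pvBsuf k1 k2 ∨ pvBsuf k2 k1 ∨ k1 = k2 := by
  rcases h1 with rfl | h1
  · rcases h2 with rfl | h2
    · exact Or.inr (Or.inr rfl)
    · exact Or.inl (Or.inr h2)
  · rcases h2 with rfl | h2
    · exact Or.inr (Or.inl (Or.inr h1))
    · rcases List.suffix_or_suffix_of_suffix h1 h2 with h | h
      · rcases List.suffix_cons_iff.mp h with he | h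
        · injection he with _ h2'
          exact Or.inr (Or.inr h2')
        · exact Or.inr (Or.inl (Or.inr h))
      · rcases List.suffix_cons_iff.mp h with he | h
        · injection he with _ h2'
          exact Or.inr (Or.inr h2'.symm)
        · exact Or.inl (Or.inr h)

-- matching keys determine the tld uniquely
lemma pvTld_uniq {cs k1 k2 : List Char} {t1 t2 : String}
    (m1 : (k1, t1) ∈ pvIdx.items) (m2 : (k2, t2) ∈ pvIdx.items)
    (h1 : pvBsuf cs k1) (h2 : pvBsuf cs k2) : t1 = t2 := by
  rcases pvBsuf_antichain cs k1 k2 h1 h2 with h | h | rfl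
  · exact pvKey_uniq _ m1 _ m2 (by simp [(pvBsufB_iff _ _).mpr h])
  · exact (pvKey_uniq _ m2 _ m1 (by simp [(pvBsufB_iff _ _).mpr h])).symm
  · exact pvKey_uniq _ m1 _ m2 (by simp)

-- stepping past the first dot preserves boundary suffixes
lemma pvBsuf_step (k : List Char) :
    ∀ (cs tail : List Char) (c : Char), ('.' :: k) <:+ cs →
      cs.dropWhile (· != '.') = c :: tail → pvBsuf tail k := by
  intro cs
  induction cs with
  | nil => intro tail c h hd; simp at hd
  | cons a cs ih =>
    intro tail c h hd
    by_cases ha : a = '.'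
    · subst ha
      rw [List.dropWhile_cons_of_neg (by simp)] at hd
      injection hd with _ h2
      rcases List.suffix_cons_iff.mp h with he | h
      · injection he with _ h2'
        exact Or.inl (h2 ▸ h2'.symm)
      · exact Or.inr (h2 ▸ h)
    · rw [List.dropWhile_cons_of_pos (by simp [ha])] at hd
      rcases List.suffix_cons_iff.mp h with he | h
      · injection he with h1 _
        exact absurd h1.symm ha
      · exact ih tail c h hd

lemma pvWalk_sound : ∀ (cs : List Char) (t : String),
    pvWalk cs = some t → ∃ k, (k, t) ∈ pvIdx.items ∧ pvBsuf cs k := by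
  intro cs
  induction cs using pvWalk.induct with
  | case1 cs t' hget =>
    intro t h
    rw [pvWalk_eq_hit hget] at h
    injection h with h
    subst h
    exact ⟨cs, PySem.Dict.mem_items_of_get?_eq_some _ hget, Or.inl rfl⟩
  | case2 cs hget hd =>
    intro t h
    rw [pvWalk_eq_none hget hd] at h
    cases h
  | case3 cs hget c tail hd ih =>
    intro t h
    rw [pvWalk_eq_step hget hd] at h
    obtain ⟨k, hk, hb⟩ := ih t h
    refine ⟨k, hk, Or.inr ?_⟩
    have htail : ('.' :: k) <:+ c :: tail := by
      rcases hb with rfl | hb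
      · have hne : cs.dropWhile (· != '.') ≠ [] := by simp [hd]
        have hc := List.head_dropWhile_not (fun x => x != '.') hne
        have hchead : (cs.dropWhile (· != '.')).head hne = c := by
          simp only [hd, List.head_cons]
        rw [hchead] at hc
        have hcdot : c = '.' := by simpa using hc
        exact hcdot ▸ List.suffix_refl _
      · exact hb.trans (List.suffix_cons _ _)
    exact htail.trans (hd ▸ List.dropWhile_suffix _)

lemma pvWalk_complete : ∀ (cs k : List Char) (t : String),
    (k, t) ∈ pvIdx.items → pvBsuf cs k → pvWalk cs ≠ none := by
  intro cs
  induction cs using pvWalk.induct with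
  | case1 cs t' hget => intro k t _ _; rw [pvWalk_eq_hit hget]; simp
  | case2 cs hget hd =>
    intro k t hm hb
    rcases hb with rfl | hb
    · exact absurd (PySem.Dict.get?_of_mem_items _ hm pvIdx_nodup_keys) (by simp [hget])
    · have hmem : '.' ∈ cs := hb.subset (by simp)
      have := List.dropWhile_eq_nil_iff.mp hd '.' hmem
      simp at this
  | case3 cs hget c tail hd ih =>
    intro k t hm hb
    rw [pvWalk_eq_step hget hd]
    rcases hb with rfl | hb
    · exact absurd (PySem.Dict.get?_of_mem_items _ hm pvIdx_nodup_keys) (by simp [hget])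
    · exact ih k t hm (pvBsuf_step k cs tail c hb hd)

lemma pvScanA_none : ∀ (table : List (String × String)) (cs : List Char),
    (∀ p ∈ table, pvCondA cs p.2.toList = false) → pvScanA table cs = none := by
  intro table
  induction table with
  | nil => intro cs _; rfl
  | cons p rest ih =>
    intro cs h
    obtain ⟨t, md⟩ := p
    rw [pvScanA, if_neg (by simp [h (t, md) (by simp)])]
    exact ih cs fun q hq => h q (by simp [hq])

lemma pvScanA_some : ∀ (table : List (String × String)) (cs : List Char) (t : String),
    (∃ p ∈ table, pvCondA cs p.2.toList = true) →
    (∀ p ∈ table, pvCondA cs p.2.toList = true → p.1 = t) →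
    pvScanA table cs = some t := by
  intro table
  induction table with
  | nil => intro cs t h _; simp at h
  | cons p rest ih =>
    intro cs t hex hall
    obtain ⟨tp, md⟩ := p
    rw [pvScanA]
    by_cases hc : pvCondA cs md.toList = true
    · rw [if_pos hc]
      exact congrArg some (hall (tp, md) (by simp) hc)
    · rw [if_neg hc]
      refine ih cs t ?_ fun q hq => hall q (by simp [hq])
      rcases hex with ⟨q, hq, hqc⟩
      rcases List.mem_cons.mp hq with rfl | hq
      · exact absurd hqc hc
      · exact ⟨q, hq, hqc⟩

-- a matching entry of A's table yields a matching key of B's dict, with the same tld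
lemma pvCond_to_key {cs : List Char} {p : String × String} (hp : p ∈ pvTable)
    (hc : pvCondA cs p.2.toList = true) :
    ∃ k, (k, p.1) ∈ pvIdx.items ∧ pvBsuf cs k := by
  rcases (pvCondA_iff cs p.2.toList).mp hc with h | h
  · exact ⟨p.2.toList, pvTable_key1 p hp, h⟩
  · exact ⟨'s' :: '.' :: p.2.toList, pvTable_key2 p hp, h⟩

lemma pvScan_eq_walk (cs : List Char) : pvScanA pvTable cs = pvWalk cs := by
  cases hw : pvWalk cs with
  | some t =>
    obtain ⟨k, hk, hb⟩ := pvWalk_sound cs t hw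
    obtain ⟨p, hp, hpt, hpk⟩ := pvItems_src (k, t) hk
    refine pvScanA_some pvTable cs t ⟨p, hp, ?_⟩ ?_
    · refine (pvCondA_iff cs p.2.toList).mpr ?_
      rcases hpk with h | h
      · exact Or.inl (h ▸ hb)
      · exact Or.inr (h ▸ hb)
    · intro q hq hqc
      obtain ⟨k', hk', hb'⟩ := pvCond_to_key hq hqc
      exact pvTld_uniq hk' hk hb' hb
  | none =>
    refine pvScanA_none pvTable cs fun p hp => ?_
    by_contra hc
    simp only [Bool.not_eq_false] at hc
    obtain ⟨k, hk, hb⟩ := pvCond_to_key hp hc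
    exact pvWalk_complete cs k p.1 hk hb hw

-- ===== VERDICT (by name: the statement is the Claim_ definition above) =====
theorem detect_tld_from_host_py_spec : Claim_equal_detect_tld_from_host_py := by
  intro host _
  unfold Spec_detect_tld_from_host_py detect_tld_from_host_py detect_tld_from_host_py_alt
  by_cases h : pvNormalize host = []
  · simp [h]
  · simp [h, pvScan_eq_walk]
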